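-- pv_equiv track=rewrite | github.com/Lasvut/Testing | ultra_anomaly_detection.py | _count_consecutive_specials
-- ===== SOURCE A (Python) =====
-- def _count_consecutive_specials(string):
--     """Count maximum consecutive special characters"""
--     count = 0
--     max_count = 0
--     for char in string:
--         if not char.isalnum():
--             count += 1
--             max_count = max(max_count, count)
--         else:
--             count = 0
--     return max_count
-- ===== SOURCE B (Python) =====
-- from itertools import groupby
--
-- def _count_consecutive_specials(string):
--     return max(
--         (sum(1 for _ in g) for k, g in groupby(string, key=str.isalnum) if not k),
--         default=0,
--     )
-- ===== Notes on version B (the rewrite author's own statement) =====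
-- stated objective: idiomatic
-- what changed: Replaces the manual counter/max loop with itertools.groupby keyed on isalnum: take the maximal runs, keep the non-alphanumeric ones, and return the maximum run length with default 0.
import Mathlib
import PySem

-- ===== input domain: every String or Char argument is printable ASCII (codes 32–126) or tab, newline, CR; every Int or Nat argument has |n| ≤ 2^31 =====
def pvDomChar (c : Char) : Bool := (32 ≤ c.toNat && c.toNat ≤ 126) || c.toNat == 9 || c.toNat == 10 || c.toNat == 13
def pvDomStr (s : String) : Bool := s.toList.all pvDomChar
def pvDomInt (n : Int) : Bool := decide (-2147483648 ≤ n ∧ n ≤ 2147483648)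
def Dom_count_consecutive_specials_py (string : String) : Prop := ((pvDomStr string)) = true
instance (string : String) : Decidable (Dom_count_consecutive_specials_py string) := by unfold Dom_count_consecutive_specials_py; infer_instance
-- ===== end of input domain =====

-- B replaces A's running counter/maximum loop with a groupby-style decomposition into
-- maximal isalnum-keyed runs, returning the max length of the non-alphanumeric runs (idiomatic).

-- ===== PORT A =====
-- state = (count, max_count); one step per character, branches in A's order
def count_consecutive_specials_py (string : String) : Int :=
  (string.toList.foldl
    (fun st ch =>
      if !(PySem.Chars.isalnum ch) then (st.1 + 1, max st.2 (st.1 + 1))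
      else ((0 : Int), st.2))
    ((0 : Int), (0 : Int))).2

-- ===== PORT B =====
-- groupby(string, key=str.isalnum): the list of (key, run length) over maximal runs
def pvGroups : List Char → List (Bool × Int)
  | [] => []
  | ch :: t =>
    let k := PySem.Chars.isalnum ch
    let p := fun c => PySem.Chars.isalnum c == k
    (k, ((ch :: t).takeWhile p).length) :: pvGroups ((ch :: t).dropWhile p)
termination_by l => l.length
decreasing_by
  simp only [List.dropWhile_cons, beq_self_eq_true, if_true]
  exact Nat.lt_succ_of_le (List.length_dropWhile_le _ _)

-- max((run length for k, g in groups if not k), default=0)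
def pvBestRun : List (Bool × Int) → Int
  | [] => 0
  | (k, n) :: t => if k then pvBestRun t else max n (pvBestRun t)

def count_consecutive_specials_py_alt (string : String) : Int :=
  pvBestRun (pvGroups string.toList)

-- ===== PRECONDITION & SPEC =====
def Spec_count_consecutive_specials_py (string : String) (out : Int) : Prop := out = count_consecutive_specials_py_alt string
instance (string : String) (out : Int) : Decidable (Spec_count_consecutive_specials_py string out) := by unfold Spec_count_consecutive_specials_py; infer_instance

-- ===== CLAIM (what is proved, stated in full; the proofs are below) =====
def Claim_equal_count_consecutive_specials_py : Prop := ∀ (string : String), Dom_count_consecutive_specials_py string → Spec_count_consecutive_specials_py string (count_consecutive_specials_py string)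

-- ===== LEMMAS AND PROOFS =====

-- A's loop on a list, starting from an arbitrary state
def pvFoldA (l : List Char) (c m : Int) : Int :=
  (l.foldl
    (fun st ch =>
      if !(PySem.Chars.isalnum ch) then (st.1 + 1, max st.2 (st.1 + 1))
      else ((0 : Int), st.2))
    (c, m)).2

theorem pvFoldA_nil (c m : Int) : pvFoldA [] c m = m := rfl

theorem pvFoldA_cons (ch : Char) (t : List Char) (c m : Int) :
    pvFoldA (ch :: t) c m =
      if !(PySem.Chars.isalnum ch) then pvFoldA t (c + 1) (max m (c + 1))
      else pvFoldA t 0 m := by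
  simp only [pvFoldA, List.foldl_cons]
  split_ifs <;> simp

theorem pvFoldA_nonneg (l : List Char) (c m : Int) (hc : 0 ≤ c) (hm : 0 ≤ m) :
    0 ≤ pvFoldA l c m := by
  induction l generalizing c m with
  | nil => simpa [pvFoldA_nil] using hm
  | cons ch t ih =>
    rw [pvFoldA_cons]
    split_ifs with h
    · exact ih (c + 1) _ (by omega) (by omega)
    · exact ih 0 m (by omega) hm

-- extract the accumulator: foldA l c m = max m (foldA l c 0)
theorem pvFoldA_max (l : List Char) (c m : Int) (hc : 0 ≤ c) (hm : 0 ≤ m) :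
    pvFoldA l c m = max m (pvFoldA l c 0) := by
  induction l generalizing c m with
  | nil => simp only [pvFoldA_nil]; omega
  | cons ch t ih =>
    rw [pvFoldA_cons, pvFoldA_cons]
    split_ifs with h
    · rw [ih (c + 1) (max m (c + 1)) (by omega) (by omega),
        ih (c + 1) (max 0 (c + 1)) (by omega) (by omega)]
      have := pvFoldA_nonneg t (c + 1) 0 (by omega) le_rfl
      omega
    · rw [ih 0 m (by omega) hm]

-- a nonempty all-alphanumeric run resets the counter and leaves the maximum
theorem pvFoldA_alnum_run (r : List Char) (hne : r ≠ [])
    (hr : ∀ c ∈ r, PySem.Chars.isalnum c = true)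
    (rest : List Char) (c m : Int) :
    pvFoldA (r ++ rest) c m = pvFoldA rest 0 m := by
  induction r generalizing c with
  | nil => exact absurd rfl hne
  | cons a r' ih =>
    have ha := hr a List.mem_cons_self
    rw [List.cons_append, pvFoldA_cons, ha]
    simp only [Bool.not_true, Bool.false_eq_true, if_false]
    cases r' with
    | nil => rfl
    | cons b r'' =>
      exact ih (by simp) (fun x hx => hr x (List.mem_cons_of_mem _ hx)) 0

-- a nonempty all-special run adds its length to the counter and the maximum
theorem pvFoldA_special_run (r : List Char) (hne : r ≠ [])
    (hr : ∀ c ∈ r, PySem.Chars.isalnum c = false)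
    (rest : List Char) (c m : Int) (hc : 0 ≤ c) (hm : 0 ≤ m) :
    pvFoldA (r ++ rest) c m = pvFoldA rest (c + r.length) (max m (c + r.length)) := by
  induction r generalizing c m with
  | nil => exact absurd rfl hne
  | cons a r' ih =>
    have ha := hr a List.mem_cons_self
    rw [List.cons_append, pvFoldA_cons, ha]
    simp only [Bool.not_false, if_true]
    cases r' with
    | nil =>
      simp only [List.nil_append, List.length_cons, List.length_nil]
      norm_num
    | cons b r'' =>
      rw [ih (by simp) (fun x hx => hr x (List.mem_cons_of_mem _ hx)) (c + 1)
        (max m (c + 1)) (by omega) (by omega)]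
      have h1 : c + 1 + ((b :: r'').length : Int) = c + ((a :: b :: r'').length : Int) := by
        simp only [List.length_cons]; push_cast; omega
      rw [h1]
      congr 1
      simp only [List.length_cons]
      push_cast
      omega

-- when the list is empty or starts alphanumeric, the incoming counter is irrelevant
theorem pvFoldA_counter_irrel (l : List Char)
    (hl : l = [] ∨ ∃ d t, l = d :: t ∧ PySem.Chars.isalnum d = true) (c m : Int) :
    pvFoldA l c m = pvFoldA l 0 m := by
  rcases hl with rfl | ⟨d, t, rfl, hd⟩
  · rfl
  · rw [pvFoldA_cons, pvFoldA_cons, hd]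
    simp

-- equation lemmas for the well-founded pvGroups (proved once, reused below)
theorem pvGroups_nil : pvGroups [] = [] := by rw [pvGroups]

theorem pvGroups_cons (ch : Char) (t : List Char) : pvGroups (ch :: t) =
    (PySem.Chars.isalnum ch,
      (((ch :: t).takeWhile (fun c => PySem.Chars.isalnum c == PySem.Chars.isalnum ch)).length : Int))
    :: pvGroups ((ch :: t).dropWhile (fun c => PySem.Chars.isalnum c == PySem.Chars.isalnum ch)) := by
  rw [pvGroups]

-- the head of dropWhile fails the predicate
theorem pvDropWhile_head_false (p : Char → Bool) :
    ∀ (l : List Char) (d : Char) (t : List Char), l.dropWhile p = d :: t → p d = false := by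
  intro l
  induction l with
  | nil => intro d t h; simp [List.dropWhile] at h
  | cons a l ih =>
    intro d t h
    rw [List.dropWhile_cons] at h
    split_ifs at h with ha
    · exact ih d t h
    · cases h; simpa using ha

-- main invariant: A's loop from (0,0) computes B's best-run value
theorem pvMain : ∀ (n : Nat) (l : List Char), l.length ≤ n →
    pvFoldA l 0 0 = pvBestRun (pvGroups l) := by
  intro n
  induction n with
  | zero =>
    intro l hl
    rw [List.length_eq_zero_iff.mp (Nat.le_zero.mp hl)]
    rw [pvGroups_nil]
    rfl
  | succ n ih =>
    intro l hl
    cases l with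
    | nil =>
      rw [pvGroups_nil]
      rfl
    | cons ch t =>
      set k := PySem.Chars.isalnum ch with hk
      set p := fun c => PySem.Chars.isalnum c == k with hp
      have hsplit : (ch :: t).takeWhile p ++ (ch :: t).dropWhile p = ch :: t :=
        List.takeWhile_append_dropWhile
      have hpch : p ch = true := by simp [hp, hk]
      have hrun_ne : (ch :: t).takeWhile p ≠ [] := by
        simp [hpch]
      have hrun_mem : ∀ x ∈ (ch :: t).takeWhile p, PySem.Chars.isalnum x = k := by
        intro x hx
        have := List.mem_takeWhile_imp hx
        simpa [hp] using this
      have hdroplen : ((ch :: t).dropWhile p).length ≤ n := by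
        have h1 : (ch :: t).dropWhile p = t.dropWhile p := by
          simp [hpch]
        rw [h1]
        have := List.length_dropWhile_le p t
        simp only [List.length_cons] at hl
        omega
      have hdrop_shape : (ch :: t).dropWhile p = [] ∨
          ∃ d t', (ch :: t).dropWhile p = d :: t' ∧ PySem.Chars.isalnum d = (!k) := by
        cases hd : (ch :: t).dropWhile p with
        | nil => exact Or.inl rfl
        | cons d t' =>
          refine Or.inr ⟨d, t', rfl, ?_⟩
          have := pvDropWhile_head_false p (ch :: t) d t' hd
          simp only [hp, beq_eq_false_iff_ne, ne_eq] at this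
          cases hkv : PySem.Chars.isalnum d <;> cases hkk : k <;>
            simp only [hkv, hkk, Bool.not_true, Bool.not_false] at this ⊢ <;>
            first | rfl | exact absurd trivial this
      have hgroups : pvGroups (ch :: t) =
          (k, (((ch :: t).takeWhile p).length : Int)) :: pvGroups ((ch :: t).dropWhile p) :=
        pvGroups_cons ch t
      have hIH := ih ((ch :: t).dropWhile p) hdroplen
      rw [hgroups]
      cases hkk : k with
      | true =>
        -- alphanumeric run: skipped by pvBestRun, counter resets
        have : pvFoldA (ch :: t) 0 0 = pvFoldA ((ch :: t).dropWhile p) 0 0 := by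
          conv_lhs => rw [← hsplit]
          exact pvFoldA_alnum_run _ hrun_ne
            (fun x hx => by rw [hrun_mem x hx, hkk]) _ 0 0
        rw [this, hIH, pvBestRun]
        simp
      | false =>
        -- special run of length L ≥ 1
        set L : Int := (((ch :: t).takeWhile p).length : Int) with hL
        have hL1 : 1 ≤ L := by
          have : 0 < ((ch :: t).takeWhile p).length := List.length_pos_iff.mpr hrun_ne
          simp only [hL]; omega
        have h1 : pvFoldA (ch :: t) 0 0 =
            pvFoldA ((ch :: t).dropWhile p) L (max 0 L) := by
          conv_lhs => rw [← hsplit]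
          have := pvFoldA_special_run _ hrun_ne
            (fun x hx => by rw [hrun_mem x hx, hkk]) ((ch :: t).dropWhile p) 0 0 le_rfl le_rfl
          simpa [hL] using this
        have hmax0 : max 0 L = L := by omega
        rw [h1, hmax0,
          pvFoldA_max _ L L (by omega) (by omega),
          pvFoldA_counter_irrel _ (by
            rcases hdrop_shape with h | ⟨d, t', hdt, hdal⟩
            · exact Or.inl h
            · exact Or.inr ⟨d, t', hdt, by rw [hdal, hkk]; rfl⟩) L 0,
          hIH, pvBestRun]
        simp

-- ===== VERDICT (by name: the statement is the Claim_ definition above) =====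
theorem count_consecutive_specials_py_spec : Claim_equal_count_consecutive_specials_py := by
  intro s _
  show count_consecutive_specials_py s = count_consecutive_specials_py_alt s
  unfold count_consecutive_specials_py count_consecutive_specials_py_alt
  exact pvMain s.toList.length s.toList le_rfl
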